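-- pv_equiv track=rewrite | github.com/sbecks1/aoc20201 | solutions/day8.py | part1
-- ===== SOURCE A (Python) =====
-- def part1(vals) -> int:
--     lengths_1478 = [2, 4, 3, 7]
--
--     known_digits = 0
--
--     for line in vals:
--         for digit in line.split(" "):
--             if len(digit) in lengths_1478:
--                 known_digits += 1
--
--     return known_digits
-- ===== SOURCE B (Python) =====
-- def part1(vals) -> int:
--     total = 0
--     for line in vals:
--         run = 0
--         for ch in line + " ":
--             if ch == " ":
--                 if run in (2, 3, 4, 7):
--                     total += 1
--                 run = 0
--             else:
--                 run += 1
--     return total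
-- ===== Notes on version B (the rewrite author's own statement) =====
-- stated objective: alternative
-- what changed: Replaces split-then-test by a character-level streaming state machine: each line is scanned once character by character keeping a current run length, a space (or end of line) closes the run and counts it if its length is 2, 3, 4 or 7; no word list is ever built.
import Mathlib
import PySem

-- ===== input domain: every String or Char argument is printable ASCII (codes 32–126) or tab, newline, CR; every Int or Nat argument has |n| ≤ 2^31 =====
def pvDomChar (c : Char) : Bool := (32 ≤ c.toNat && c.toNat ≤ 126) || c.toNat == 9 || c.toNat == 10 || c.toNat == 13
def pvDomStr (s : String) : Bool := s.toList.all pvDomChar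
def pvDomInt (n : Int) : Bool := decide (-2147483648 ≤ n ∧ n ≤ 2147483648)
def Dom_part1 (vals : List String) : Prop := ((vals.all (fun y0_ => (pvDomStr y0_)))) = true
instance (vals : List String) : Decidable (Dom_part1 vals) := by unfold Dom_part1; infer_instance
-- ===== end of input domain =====

-- B replaces split-then-test by a character-level streaming state machine (one scan per line keeping
-- the current run length; a space or end of line closes the run): a different algorithm, same cost.
-- ===== PORT A =====
def part1 (vals : List String) : Int :=
  let lengths_1478 : List Int := [2, 4, 3, 7]
  vals.foldl (fun known_digits line =>
    ((PySem.Str.split? line " ").getD []).foldl (fun kd digit =>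
      if lengths_1478.contains (PySem.Str.len digit) then kd + 1 else kd) known_digits) 0

-- ===== PORT B =====
def part1_alt (vals : List String) : Int :=
  vals.foldl (fun total line =>
    ((line.toList ++ [' ']).foldl
      (fun (s : Int × Int) ch =>
        if ch = ' ' then
          (if ([2, 3, 4, 7] : List Int).contains s.2 then (s.1 + 1, 0) else (s.1, 0))
        else (s.1, s.2 + 1))
      (total, 0)).1) 0

-- ===== PRECONDITION & SPEC =====
def Spec_part1 (vals : List String) (out : Int) : Prop := out = part1_alt vals
instance (vals : List String) (out : Int) : Decidable (Spec_part1 vals out) := by unfold Spec_part1; infer_instance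

-- ===== CLAIM (what is proved, stated in full; the proofs are below) =====
def Claim_equal_part1 : Prop := ∀ (vals : List String), Dom_part1 vals → Spec_part1 vals (part1 vals)

-- ===== LEMMAS AND PROOFS =====

-- simple (unfueled) split on a single space, accumulating the current word reversed
def splitSimple : List Char → List Char → List (List Char)
  | [], cur => [cur.reverse]
  | c :: rest, cur => if c = ' ' then cur.reverse :: splitSimple rest [] else splitSimple rest (c :: cur)

-- the fueled splitOn.go on separator [' '] is splitSimple once the fuel exceeds the input length
lemma go_space_eq (l : List Char) : ∀ (fuel : Nat) (cur : List Char) (acc : List (List Char)),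
    l.length < fuel →
    PySem.Chars.splitOn.go [' '] fuel l cur acc = acc.reverse ++ splitSimple l cur := by
  induction l with
  | nil =>
    intro fuel cur acc h
    match fuel, h with
    | fuel+1, _ => simp [PySem.Chars.splitOn.go, splitSimple]
  | cons c rest ih =>
    intro fuel cur acc h
    match fuel, h with
    | fuel+1, h =>
      have hlt : rest.length < fuel := by simp at h; omega
      by_cases hc : c = ' '
      · subst hc
        rw [show PySem.Chars.splitOn.go [' '] (fuel+1) (' '::rest) cur acc
              = PySem.Chars.splitOn.go [' '] fuel rest [] (cur.reverse :: acc) from by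
            simp [PySem.Chars.splitOn.go, List.isPrefixOf]]
        rw [ih fuel [] _ hlt]
        simp [splitSimple]
      · rw [show PySem.Chars.splitOn.go [' '] (fuel+1) (c::rest) cur acc
              = PySem.Chars.splitOn.go [' '] fuel rest (c :: cur) acc from by
            simp [PySem.Chars.splitOn.go, List.isPrefixOf, Ne.symm hc]]
        rw [ih fuel (c::cur) acc hlt]
        simp [splitSimple, hc]

lemma splitOn_space (cs : List Char) :
    PySem.Chars.splitOn cs [' '] = splitSimple cs [] := by
  unfold PySem.Chars.splitOn
  exact go_space_eq cs _ [] [] (by omega)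

-- the word predicate of the scan, on the char-list side
def wok (w : List Char) : Bool := ([2, 3, 4, 7] : List Int).contains (w.length : Int)

-- the streaming scan of cs (plus the closing space) counts the pieces of splitSimple that satisfy wok
lemma scan_eq (cs : List Char) : ∀ (t : Int) (cur : List Char),
    (cs ++ [' ']).foldl
      (fun (s : Int × Int) ch =>
        if ch = ' ' then
          (if ([2, 3, 4, 7] : List Int).contains s.2 then (s.1 + 1, 0) else (s.1, 0))
        else (s.1, s.2 + 1)) (t, (cur.length : Int))
    = (t + ((splitSimple cs cur).countP wok : Nat), 0) := by
  induction cs with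
  | nil =>
    intro t cur
    have hwr : wok cur.reverse = ([2, 3, 4, 7] : List Int).contains ((cur.length : Nat) : Int) := by
      simp [wok]
    simp only [List.nil_append, List.foldl_cons, List.foldl_nil, splitSimple,
      List.countP_cons, List.countP_nil, hwr]
    cases hb : ([2, 3, 4, 7] : List Int).contains ((cur.length : Nat) : Int) <;> simp [hb]
  | cons c rest ih =>
    intro t cur
    simp only [List.cons_append, List.foldl_cons]
    by_cases hc : c = ' '
    · subst hc
      have hwr : wok cur.reverse = ([2, 3, 4, 7] : List Int).contains ((cur.length : Nat) : Int) := by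
        simp [wok]
      have h0 := fun t' => ih t' ([] : List Char)
      simp only [List.length_nil, Nat.cast_zero] at h0
      simp only [if_pos rfl]
      cases hb : ([2, 3, 4, 7] : List Int).contains ((cur.length : Nat) : Int)
      · have hw : wok cur.reverse = false := hwr.trans hb
        simp only [hb, Bool.false_eq_true, if_false, if_pos trivial, h0 t, splitSimple,
          List.countP_cons, hw]
        simp
      · have hw : wok cur.reverse = true := hwr.trans hb
        simp only [hb, if_pos trivial, h0 (t + 1), splitSimple, List.countP_cons, hw]
        simp [Prod.ext_iff]
        ring
    · rw [if_neg hc]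
      have := ih t (c :: cur)
      simp only [List.length_cons] at this
      rw [show ((cur.length : Int) + 1) = ((cur.length + 1 : Nat) : Int) by push_cast; ring, this]
      simp [splitSimple, hc]

-- ===== VERDICT (by name: the statement is the Claim_ definition above) =====
theorem part1_spec : Claim_equal_part1 := by
  intro vals _
  unfold Spec_part1 part1 part1_alt
  refine PySem.List.foldl_congr_mem _ _ _ _ ?_
  intro acc line _
  rw [PySem.List.foldl_if_add_one]
  have hsplit : (PySem.Str.split? line " ").getD []
      = (PySem.Chars.splitOn line.toList [' ']).map String.ofList := by
    simp [PySem.Str.split?, PySem.Chars.split?]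
  have hscan := scan_eq line.toList acc ([] : List Char)
  simp only [List.length_nil, Nat.cast_zero] at hscan
  rw [hscan]
  rw [hsplit, splitOn_space, List.countP_map]
  congr 2
  apply List.countP_congr
  intro w _
  simp [PySem.Str.len, wok, Function.comp]
  tauto
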